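-- pv_equiv track=rewrite | github.com/gindij/stanford-cs336-assignment1-basics | cs336_basics/bpe.py | replace_pairs_by_location
-- ===== SOURCE A (Python) =====
-- from typing import Dict, Iterable, List, Optional, Set, Tuple, Union
--
-- def replace_pairs_by_location(
--     word: Tuple[int], locations: Set[int], new_ix: int
-- ) -> Tuple[int]:
--     """
--     Replace all occurrences of a pair in a word with a new integer, based on the locations
--     where the pair occurs in the word.
--
--     :param word: The tuple of integers representing a word.
--     :param locations: The set of locations where the pair occurs in the word.
--     :param new_ix: The integer to replace the pair with (if found).
--     :return: The new tuple of integers representing the word with the pair replaced.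
--     """
--     new_word = []
--     i = 0
--     while i < len(word):
--         if i in locations:
--             new_word.append(new_ix)
--             i += 2
--         else:
--             new_word.append(word[i])
--             i += 1
--     return tuple(new_word)
-- ===== SOURCE B (Python) =====
-- def replace_pairs_by_location(word, locations, new_ix):
--     result = []
--     prev = 0
--     for loc in sorted(locations):
--         if loc < prev or loc >= len(word):
--             continue
--         result.extend(word[prev:loc])
--         result.append(new_ix)
--         prev = loc + 2
--     result.extend(word[prev:])
--     return tuple(result)
-- ===== Notes on version B (the rewrite author's own statement) =====
-- stated objective: alternative
-- what changed: B iterates over sorted(locations) and splices untouched word segments with slicing, instead of A's per-index while loop with a membership test at every position.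
import Mathlib
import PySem

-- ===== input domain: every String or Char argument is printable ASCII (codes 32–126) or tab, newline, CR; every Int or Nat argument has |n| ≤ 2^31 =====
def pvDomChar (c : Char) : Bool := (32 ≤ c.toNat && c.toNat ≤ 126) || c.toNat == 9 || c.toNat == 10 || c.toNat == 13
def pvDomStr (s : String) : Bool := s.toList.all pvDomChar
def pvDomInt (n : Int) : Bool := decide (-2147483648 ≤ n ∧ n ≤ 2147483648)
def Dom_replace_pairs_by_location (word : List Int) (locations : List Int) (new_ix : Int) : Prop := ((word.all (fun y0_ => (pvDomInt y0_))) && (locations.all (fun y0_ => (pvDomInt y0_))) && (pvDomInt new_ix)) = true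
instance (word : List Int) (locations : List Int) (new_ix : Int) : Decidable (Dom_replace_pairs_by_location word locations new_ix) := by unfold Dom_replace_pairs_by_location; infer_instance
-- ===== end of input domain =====

-- B replaces A's per-index while loop by a single pass over sorted(locations) that
-- splices whole untouched slices of the word (objective: alternative decomposition, same cost).

-- ===== PORT A =====
-- the while loop of A: i scans the word, consuming 2 positions at a location, 1 otherwise
def pvLoopA (word : List Int) (locations : List Int) (new_ix : Int) (i : Nat) : List Int :=
  if i < word.length then
    if (i : Int) ∈ locations then
      new_ix :: pvLoopA word locations new_ix (i + 2)
    else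
      word.getD i 0 :: pvLoopA word locations new_ix (i + 1)
  else []
termination_by word.length - i

def replace_pairs_by_location (word : List Int) (locations : List Int) (new_ix : Int) : List Int :=
  pvLoopA word locations new_ix 0

-- ===== PORT B =====
-- Source B: for loc in sorted(locations): skip if loc < prev or loc >= len(word); else
-- extend with word[prev:loc], append new_ix, prev = loc + 2; finally extend with word[prev:]
def replace_pairs_by_location_alt (word : List Int) (locations : List Int) (new_ix : Int) : List Int :=
  let st := (PySem.List.sorted locations (fun x => x) false).foldl
    (fun (st : List Int × Int) loc =>
      if loc < st.2 ∨ (word.length : Int) ≤ loc then st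
      else (st.1 ++ PySem.List.slice word (some st.2) (some loc) ++ [new_ix], loc + 2))
    ([], 0)
  st.1 ++ PySem.List.slice word (some st.2) none

-- ===== PRECONDITION & SPEC =====
def Spec_replace_pairs_by_location (word : List Int) (locations : List Int) (new_ix : Int) (out : List Int) : Prop := out = replace_pairs_by_location_alt word locations new_ix
instance (word : List Int) (locations : List Int) (new_ix : Int) (out : List Int) : Decidable (Spec_replace_pairs_by_location word locations new_ix out) := by unfold Spec_replace_pairs_by_location; infer_instance

-- ===== CLAIM (what is proved, stated in full; the proofs are below) =====
def Claim_equal_replace_pairs_by_location : Prop := ∀ (word : List Int) (locations : List Int) (new_ix : Int), Dom_replace_pairs_by_location word locations new_ix → Spec_replace_pairs_by_location word locations new_ix (replace_pairs_by_location word locations new_ix)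

-- ===== LEMMAS AND PROOFS =====

-- recursive form of B's fold (proof helper)
def pvGoB (word : List Int) (new_ix : Int) : List Int → Int → List Int
  | [], prev => PySem.List.slice word (some prev) none
  | loc :: rest, prev =>
    if loc < prev ∨ (word.length : Int) ≤ loc then pvGoB word new_ix rest prev
    else PySem.List.slice word (some prev) (some loc) ++ new_ix :: pvGoB word new_ix rest (loc + 2)

lemma pvFoldl_goB (word : List Int) (new_ix : Int) :
    ∀ (L : List Int) (acc : List Int) (prev : Int),
      (L.foldl
        (fun (st : List Int × Int) loc =>
          if loc < st.2 ∨ (word.length : Int) ≤ loc then st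
          else (st.1 ++ PySem.List.slice word (some st.2) (some loc) ++ [new_ix], loc + 2))
        (acc, prev)).1 ++
      PySem.List.slice word (some ((L.foldl
        (fun (st : List Int × Int) loc =>
          if loc < st.2 ∨ (word.length : Int) ≤ loc then st
          else (st.1 ++ PySem.List.slice word (some st.2) (some loc) ++ [new_ix], loc + 2))
        (acc, prev)).2)) none = acc ++ pvGoB word new_ix L prev := by
  intro L
  induction L with
  | nil => intro acc prev; simp [pvGoB]
  | cons loc rest ih =>
    intro acc prev
    by_cases h : loc < prev ∨ (word.length : Int) ≤ loc
    · simp only [List.foldl_cons, if_pos h, pvGoB, ih]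
    · simp only [List.foldl_cons, if_neg h, pvGoB]
      rw [ih]
      simp [List.append_assoc]

-- copy the untouched segment [i, m): A copies word elementwise there
lemma pvLoopA_segment (word : List Int) (locations : List Int) (new_ix : Int) :
    ∀ (k i m : Nat), m - i = k → i ≤ m → m ≤ word.length →
      (∀ j : Nat, i ≤ j → j < m → ((j : Int) ∉ locations)) →
      pvLoopA word locations new_ix i = (word.drop i).take (m - i) ++ pvLoopA word locations new_ix m := by
  intro k
  induction k with
  | zero =>
    intro i m hk him hm hnot
    have : i = m := by omega
    subst this; simp
  | succ k ih =>
    intro i m hk him hm hnot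
    have hi : i < word.length := by omega
    have hni : (i : Int) ∉ locations := hnot i le_rfl (by omega)
    rw [pvLoopA, if_pos hi, if_neg hni]
    have := ih (i + 1) m (by omega) (by omega) hm
      (fun j hj1 hj2 => hnot j (by omega) hj2)
    rw [this]
    have hdrop : word.drop i = word[i] :: word.drop (i + 1) :=
      List.drop_eq_getElem_cons hi
    have hm' : m - i = (m - (i + 1)) + 1 := by omega
    rw [hm', hdrop, List.take_succ_cons]
    simp [List.getD_eq_getElem?_getD, List.getElem?_eq_getElem hi]

lemma pvLoopA_stop (word : List Int) (locations : List Int) (new_ix : Int) :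
    pvLoopA word locations new_ix word.length = [] := by
  rw [pvLoopA]; simp

lemma pvGoB_eq_loopA (word : List Int) (locations : List Int) (new_ix : Int) :
    ∀ (L : List Int) (i : Nat), L.Pairwise (· ≤ ·) →
      (∀ j : Nat, i ≤ j → j < word.length → (((j : Int) ∈ L) ↔ ((j : Int) ∈ locations))) →
      pvGoB word new_ix L (i : Int) = pvLoopA word locations new_ix i := by
  intro L
  induction L with
  | nil =>
    intro i _ hmem
    have hnot : ∀ j : Nat, i ≤ j → j < word.length → ((j : Int) ∉ locations) := by
      intro j h1 h2 hc
      exact (List.not_mem_nil ((hmem j h1 h2).mpr hc))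
    by_cases hil : i ≤ word.length
    · have := pvLoopA_segment word locations new_ix (word.length - i) i word.length rfl hil le_rfl
        (fun j h1 h2 => hnot j h1 h2)
      rw [this, pvLoopA_stop, List.append_nil]
      simp only [pvGoB, PySem.List.slice_from_natCast]
      exact (List.take_of_length_le (by simp)).symm
    · rw [pvLoopA]
      simp only [pvGoB, PySem.List.slice_from_natCast]
      rw [if_neg (by omega), List.drop_eq_nil_of_le (by omega)]
  | cons loc rest ih =>
    intro i hpw hmem
    have hpw' : rest.Pairwise (· ≤ ·) := hpw.tail
    have hloc_le : ∀ x ∈ rest, loc ≤ x := fun x hx => (List.pairwise_cons.mp hpw).1 x hx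
    by_cases h1 : loc < (i : Int)
    · rw [pvGoB, if_pos (Or.inl h1)]
      exact ih i hpw' (by
        intro j hj1 hj2
        have hne : (j : Int) ≠ loc := by
          have : (i : Int) ≤ (j : Int) := by exact_mod_cast hj1
          omega
        have := hmem j hj1 hj2
        simpa [List.mem_cons, hne] using this)
    · by_cases h2 : (word.length : Int) ≤ loc
      · rw [pvGoB, if_pos (Or.inr h2)]
        exact ih i hpw' (by
          intro j hj1 hj2
          have hne : (j : Int) ≠ loc := by
            have : (j : Int) < (word.length : Int) := by exact_mod_cast hj2
            omega
          have := hmem j hj1 hj2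
          simpa [List.mem_cons, hne] using this)
      · -- i ≤ loc < word.length
        have hloc0 : 0 ≤ loc := le_trans (by exact_mod_cast Nat.zero_le i) (not_lt.mp h1)
        obtain ⟨m, rfl⟩ : ∃ m : Nat, loc = (m : Int) := ⟨loc.toNat, (Int.toNat_of_nonneg hloc0).symm⟩
        have him : i ≤ m := by exact_mod_cast not_lt.mp h1
        have hmlt : m < word.length := by exact_mod_cast not_le.mp h2
        rw [pvGoB, if_neg (by push Not; exact ⟨not_lt.mp h1, not_le.mp h2⟩)]
        -- no location in [i, m)
        have hseg : ∀ j : Nat, i ≤ j → j < m → ((j : Int) ∉ locations) := by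
          intro j hj1 hj2 hc
          have hj2' : (j : Int) < (m : Int) := by exact_mod_cast hj2
          have hjL : (j : Int) ∈ (m : Int) :: rest :=
            (hmem j hj1 (by omega)).mpr hc
          rcases List.mem_cons.mp hjL with he | hr
          · omega
          · exact absurd (hloc_le _ hr) (by omega)
        have hAseg := pvLoopA_segment word locations new_ix (m - i) i m rfl him (le_of_lt hmlt) hseg
        have hmmem : (m : Int) ∈ locations :=
          (hmem m him hmlt).mp (List.mem_cons_self)
        have hAm : pvLoopA word locations new_ix m =
            new_ix :: pvLoopA word locations new_ix (m + 2) := by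
          rw [pvLoopA, if_pos hmlt, if_pos hmmem]
        have hrest := ih (m + 2) hpw' (by
          intro j hj1 hj2
          have hne : (j : Int) ≠ (m : Int) := by
            have : ((m : Nat) + 2 : Nat) ≤ j := hj1
            exact_mod_cast (by omega : j ≠ m)
          have := hmem j (by omega) hj2
          simpa [List.mem_cons, hne] using this)
        rw [hAseg, hAm, PySem.List.slice_natCast]
        have : ((m : Int) + 2) = (((m + 2 : Nat) : Int)) := by push_cast; ring
        rw [this, hrest]

-- ===== VERDICT (by name: the statement is the Claim_ definition above) =====
theorem replace_pairs_by_location_spec : Claim_equal_replace_pairs_by_location := by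
  intro word locations new_ix _
  unfold Spec_replace_pairs_by_location replace_pairs_by_location replace_pairs_by_location_alt
  rw [pvFoldl_goB]
  have hpw : (PySem.List.sorted locations (fun x => x) false).Pairwise (· ≤ ·) := by
    simpa using PySem.List.sorted_pairwise locations (fun x : Int => x)
  have := pvGoB_eq_loopA word locations new_ix
      (PySem.List.sorted locations (fun x => x) false) 0 hpw (by
    intro j _ _
    exact PySem.List.mem_sorted locations (fun x => x) false _)
  simpa using this.symm
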